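-- pv_equiv track=rewrite | github.com/stanleykosi/aptale | src/aptale/alerts/parse_rule.py | _resolve_country
-- ===== SOURCE A (Python) =====
-- _COUNTRY_ALIASES: dict[str, str] = {
--     "cn": "CN",
--     "china": "CN",
--     "prc": "CN",
--     "ng": "NG",
--     "nigeria": "NG",
--     "tr": "TR",
--     "turkey": "TR",
--     "turkiye": "TR",
--     "us": "US",
--     "usa": "US",
--     "united states": "US",
--     "ru": "RU",
--     "russia": "RU",
--     "jp": "JP",
--     "japan": "JP",
--     "gb": "GB",
--     "uk": "GB",
--     "united kingdom": "GB",
--     "de": "DE",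
--     "germany": "DE",
--     "fr": "FR",
--     "france": "FR",
-- }
--
-- def _resolve_country(value: str) -> str | None:
--     normalized = " ".join(str(value).strip().lower().split())
--     if not normalized:
--         return None
--     if normalized in _COUNTRY_ALIASES:
--         return _COUNTRY_ALIASES[normalized]
--
--     for alias, code in sorted(_COUNTRY_ALIASES.items(), key=lambda item: len(item[0]), reverse=True):
--         if alias in normalized:
--             return code
--     return None
-- ===== SOURCE B (Python) =====
-- _COUNTRY_ALIASES: dict[str, str] = {
--     "cn": "CN",
--     "china": "CN",
--     "prc": "CN",
--     "ng": "NG",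
--     "nigeria": "NG",
--     "tr": "TR",
--     "turkey": "TR",
--     "turkiye": "TR",
--     "us": "US",
--     "usa": "US",
--     "united states": "US",
--     "ru": "RU",
--     "russia": "RU",
--     "jp": "JP",
--     "japan": "JP",
--     "gb": "GB",
--     "uk": "GB",
--     "united kingdom": "GB",
--     "de": "DE",
--     "germany": "DE",
--     "fr": "FR",
--     "france": "FR",
-- }
--
-- def _resolve_country(value: str) -> str | None:
--     normalized = " ".join(str(value).strip().lower().split())
--     if not normalized:
--         return None
--     exact = _COUNTRY_ALIASES.get(normalized)
--     if exact is not None: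
--         return exact
--     best_code = None
--     best_len = -1
--     for alias, code in _COUNTRY_ALIASES.items():
--         if alias in normalized and len(alias) > best_len:
--             best_code, best_len = code, len(alias)
--     return best_code
-- ===== Notes on version B (the rewrite author's own statement) =====
-- stated objective: alternative
-- what changed: Replaced the sort-the-aliases-by-length-then-take-first-substring-match loop with a single unsorted pass over the alias dict keeping the best (longest, earliest in dict order) matching alias, so no sorted copy of the table is built.
import Mathlib
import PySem

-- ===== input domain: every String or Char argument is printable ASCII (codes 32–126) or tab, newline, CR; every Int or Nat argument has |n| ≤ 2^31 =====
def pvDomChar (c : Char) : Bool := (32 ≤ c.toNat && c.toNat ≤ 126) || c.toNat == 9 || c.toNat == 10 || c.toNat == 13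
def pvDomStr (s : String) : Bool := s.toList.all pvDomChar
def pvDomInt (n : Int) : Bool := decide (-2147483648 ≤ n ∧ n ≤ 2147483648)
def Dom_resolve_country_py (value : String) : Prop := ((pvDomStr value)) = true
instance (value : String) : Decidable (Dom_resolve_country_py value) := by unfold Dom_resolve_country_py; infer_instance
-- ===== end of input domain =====

-- B replaces A's sort-by-length-then-first-match scan with a single unsorted best-tracking pass (alternative decomposition, same result).


-- shared module-level constant _COUNTRY_ALIASES (identical in Source A and Source B)
def pvAliases : List (String × String) :=
  [("cn","CN"),("china","CN"),("prc","CN"),("ng","NG"),("nigeria","NG"),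
   ("tr","TR"),("turkey","TR"),("turkiye","TR"),("us","US"),("usa","US"),
   ("united states","US"),("ru","RU"),("russia","RU"),("jp","JP"),("japan","JP"),
   ("gb","GB"),("uk","GB"),("united kingdom","GB"),("de","DE"),("germany","DE"),
   ("fr","FR"),("france","FR")]

def pvDict : PySem.Dict String String := PySem.Dict.ofList pvAliases

-- ' '.join(str(value).strip().lower().split()) — identical line in both Pythons
def pvNormalize (value : String) : String :=
  PySem.Str.join " " (PySem.Str.split₀ (PySem.Str.lower (PySem.Str.strip value)))

-- ===== PORT A =====
-- A's for-loop with early return over the length-sorted items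
def pvLoopA (n : String) : List (String × String) → Option String
  | [] => none
  | (a, c) :: rest => if PySem.Str.isIn a n then some c else pvLoopA n rest

def resolve_country_py (value : String) : Option String :=
  let normalized := pvNormalize value
  if normalized = "" then none
  else
    match pvDict.get? normalized with
    | some c => some c
    | none =>
        pvLoopA normalized
          (PySem.List.sorted pvDict.items (fun it => PySem.Str.len it.1) true)

-- ===== PORT B =====
-- B's loop body: update (best_code, best_len) when alias matches and is strictly longer
def pvStep (n : String) (st : Option String × Int) (e : String × String) : Option String × Int :=
  if PySem.Str.isIn e.1 n && decide ((PySem.Str.len e.1 : Int) > st.2) then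
    (some e.2, (PySem.Str.len e.1 : Int))
  else st

def resolve_country_py_alt (value : String) : Option String :=
  let normalized := pvNormalize value
  if normalized = "" then none
  else
    match pvDict.get? normalized with
    | some c => some c
    | none => (pvDict.items.foldl (pvStep normalized) (none, -1)).1

-- ===== PRECONDITION & SPEC =====
def Spec_resolve_country_py (value : String) (out : Option String) : Prop := out = resolve_country_py_alt value
instance (value : String) (out : Option String) : Decidable (Spec_resolve_country_py value out) := by unfold Spec_resolve_country_py; infer_instance

-- ===== CLAIM (what is proved, stated in full; the proofs are below) =====
def Claim_equal_resolve_country_py : Prop := ∀ (value : String), Dom_resolve_country_py value → Spec_resolve_country_py value (resolve_country_py value)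

-- ===== LEMMAS AND PROOFS =====

-- stable descending insertion (by alias length), used only to relate the two loop orders
def pvIns (x : String × String) : List (String × String) → List (String × String)
  | [] => [x]
  | y :: t => if PySem.Str.len x.1 < PySem.Str.len y.1 then y :: pvIns x t else x :: y :: t

def pvSortIns (l : List (String × String)) : List (String × String) := l.foldr pvIns []

lemma pvStep_eq (n : String) (s : Option String × Int) (e : String × String) :
    pvStep n s e = if PySem.Str.isIn e.1 n = true ∧ PySem.Str.len e.1 > s.2 then
        (some e.2, PySem.Str.len e.1) else s := by
  unfold pvStep
  by_cases hp : PySem.Str.isIn e.1 n = true ∧ PySem.Str.len e.1 > s.2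
  · rw [if_pos hp, if_pos (by simp only [Bool.and_eq_true, decide_eq_true_eq]; exact ⟨hp.1, hp.2⟩)]
  · rw [if_neg hp, if_neg (by simp only [Bool.and_eq_true, decide_eq_true_eq]; exact hp)]

lemma pvStep_comm (n : String) (s : Option String × Int) (a b : String × String)
    (h : PySem.Str.len a.1 ≠ PySem.Str.len b.1) :
    pvStep n (pvStep n s a) b = pvStep n (pvStep n s b) a := by
  have h' : (a.1.toList.length : Int) ≠ (b.1.toList.length : Int) := by
    simpa [PySem.Str.len_eq] using h
  have ea : PySem.Str.len a.1 = (a.1.toList.length : Int) := PySem.Str.len_eq a.1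
  have eb : PySem.Str.len b.1 = (b.1.toList.length : Int) := PySem.Str.len_eq b.1
  have ta : a.1.toList.length = a.1.length := by simp
  have tb : b.1.toList.length = b.1.length := by simp
  simp only [pvStep_eq, PySem.Str.len_eq]
  by_cases pa : PySem.Chars.isIn a.1.toList n.toList = true <;>
    by_cases pb : PySem.Chars.isIn b.1.toList n.toList = true <;>
      simp [pa, pb] <;> split_ifs <;> first | rfl | omega

lemma pvIns_fold (n : String) : ∀ (l : List (String × String)) (x : String × String)
    (s : Option String × Int),
    List.foldl (pvStep n) s (pvIns x l) = List.foldl (pvStep n) s (x :: l) := by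
  intro l
  induction l with
  | nil => intro x s; rfl
  | cons y t ih =>
      intro x s
      unfold pvIns
      split_ifs with h
      · simp only [List.foldl_cons]
        rw [ih, List.foldl_cons, pvStep_comm n s y x (by omega)]
      · rfl

lemma pvSortIns_fold (n : String) : ∀ (l : List (String × String)) (s : Option String × Int),
    List.foldl (pvStep n) s (pvSortIns l) = List.foldl (pvStep n) s l := by
  intro l
  induction l with
  | nil => intro s; rfl
  | cons x t ih =>
      intro s
      show List.foldl (pvStep n) s (pvIns x (pvSortIns t)) = _
      rw [pvIns_fold, List.foldl_cons, ih, List.foldl_cons]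

lemma pvFold_stuck (n : String) : ∀ (l : List (String × String)) (s : Option String × Int),
    (∀ e ∈ l, (PySem.Str.len e.1 : Int) ≤ s.2) → List.foldl (pvStep n) s l = s := by
  intro l
  induction l with
  | nil => intro s _; rfl
  | cons x t ih =>
      intro s h
      have hx : (PySem.Str.len x.1 : Int) ≤ s.2 := h x (by simp)
      have hst : pvStep n s x = s := by
        rw [pvStep_eq, if_neg]
        rw [PySem.Str.len_eq] at hx
        intro hp
        rw [PySem.Str.len_eq] at hp
        omega
      rw [List.foldl_cons, hst]
      exact ih s (fun e he => h e (by simp [he]))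

lemma pvFold_sorted_eq_loop (n : String) : ∀ (l : List (String × String)),
    List.Pairwise (fun a b => PySem.Str.len b.1 ≤ PySem.Str.len a.1) l →
    (List.foldl (pvStep n) ((none : Option String), (-1 : Int)) l).1 = pvLoopA n l := by
  intro l
  induction l with
  | nil => intro _; rfl
  | cons x t ih =>
      intro hp
      rw [List.pairwise_cons] at hp
      obtain ⟨hx, ht⟩ := hp
      rw [List.foldl_cons]
      by_cases hin : PySem.Str.isIn x.1 n = true
      · have hst : pvStep n (none, -1) x = (some x.2, (PySem.Str.len x.1 : Int)) := by
          rw [pvStep_eq, if_pos ⟨hin, by show PySem.Str.len x.1 > -1; rw [PySem.Str.len_eq]; omega⟩]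
        rw [hst, pvFold_stuck n t _ (fun e he => hx e he)]
        obtain ⟨xa, xc⟩ := x
        simp only [pvLoopA, hin, if_true]
      · have hst : pvStep n (none, -1) x = (none, -1) := by
          rw [pvStep_eq, if_neg (fun hp => hin hp.1)]
        rw [hst, ih ht]
        obtain ⟨xa, xc⟩ := x
        simp only [pvLoopA]
        rw [if_neg hin]

-- the concrete length-descending order of the alias table
def pvSorted : List (String × String) :=
  [("united kingdom","GB"),("united states","US"),("nigeria","NG"),("turkiye","TR"),
   ("germany","DE"),("turkey","TR"),("russia","RU"),("france","FR"),("china","CN"),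
   ("japan","JP"),("prc","CN"),("usa","US"),("cn","CN"),("ng","NG"),("tr","TR"),
   ("us","US"),("ru","RU"),("jp","JP"),("gb","GB"),("uk","GB"),("de","DE"),("fr","FR")]

lemma pvItems_eq : pvDict.items = pvAliases := by decide

lemma pvSorted_eq :
    PySem.List.sorted pvDict.items (fun it => PySem.Str.len it.1) true = pvSorted := by decide

lemma pvSortIns_eq : pvSortIns pvAliases = pvSorted := by decide

lemma pvSorted_pairwise :
    List.Pairwise (fun a b => PySem.Str.len b.1 ≤ PySem.Str.len a.1) pvSorted := by decide

lemma pvLoops_agree (n : String) :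
    pvLoopA n (PySem.List.sorted pvDict.items (fun it => PySem.Str.len it.1) true)
      = (pvDict.items.foldl (pvStep n) (none, -1)).1 := by
  rw [pvSorted_eq, pvItems_eq, ← pvSortIns_fold n pvAliases, pvSortIns_eq]
  exact (pvFold_sorted_eq_loop n pvSorted pvSorted_pairwise).symm

-- ===== VERDICT (by name: the statement is the Claim_ definition above) =====
theorem resolve_country_py_spec : Claim_equal_resolve_country_py := by
  intro value _
  unfold Spec_resolve_country_py resolve_country_py resolve_country_py_alt
  by_cases h : pvNormalize value = ""
  · simp [h]
  · simp only [h, if_false]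
    cases hg : pvDict.get? (pvNormalize value) with
    | some c => rfl
    | none => exact pvLoops_agree (pvNormalize value)
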